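-- pv_equiv track=rewrite | github.com/KIRUBAKARAN9840/fittbot | food_template.py | sse_data
-- ===== SOURCE A (Python) =====
-- def sse_data(content: str) -> str:
--     """
--     Properly format content for SSE transmission with UTF-8 Unicode support.
--     SSE requires 'data: ' prefix and double newline. Content is sent as plain UTF-8.
--     """
--     if isinstance(content, bytes):
--         content = content.decode('utf-8', errors='replace')
--
--     lines = content.split('\n')
--     if len(lines) == 1:
--         return f"data: {content}\n\n"
--     else:
--         return ''.join(f"data: {line}\n" for line in lines) + "\n"
-- ===== SOURCE B (Python) =====
-- def sse_data(content: str) -> str: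
--     """
--     Properly format content for SSE transmission with UTF-8 Unicode support.
--     SSE requires 'data: ' prefix and double newline. Content is sent as plain UTF-8.
--     """
--     if isinstance(content, bytes):
--         content = content.decode('utf-8', errors='replace')
--
--     return "data: " + content.replace('\n', '\ndata: ') + "\n\n"
-- ===== Notes on version B (the rewrite author's own statement) =====
-- stated objective: simpler
-- what changed: Replaces the split-into-lines list, the per-line prefixing loop/join and the len(lines)==1 special case with a single str.replace that rewrites every internal newline into newline-plus-prefix.
import Mathlib
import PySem

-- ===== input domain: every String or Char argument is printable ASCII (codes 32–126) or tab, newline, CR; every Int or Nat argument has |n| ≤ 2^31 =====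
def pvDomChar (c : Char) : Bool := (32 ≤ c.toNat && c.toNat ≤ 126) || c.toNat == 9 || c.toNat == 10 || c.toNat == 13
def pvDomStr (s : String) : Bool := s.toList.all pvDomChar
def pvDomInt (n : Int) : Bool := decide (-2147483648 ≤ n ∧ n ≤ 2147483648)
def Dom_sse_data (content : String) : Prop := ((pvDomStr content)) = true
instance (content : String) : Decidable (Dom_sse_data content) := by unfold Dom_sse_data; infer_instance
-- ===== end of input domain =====

-- B replaces A's split-into-lines / per-line-prefix join (and its single-line special case)
-- with one string substitution: "data: " + content.replace('\n', '\ndata: ') + "\n\n" (simpler).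


-- ===== PORT A =====
-- the isinstance(content, bytes) decode guard is dead under the type convention (content is str)
def sse_data (content : String) : String :=
  let lines := PySem.Chars.splitOn content.toList ['\n']
  if lines.length = 1 then
    String.ofList ("data: ".toList ++ content.toList ++ ['\n', '\n'])
  else
    String.ofList ((lines.map (fun l => "data: ".toList ++ l ++ ['\n'])).flatten ++ ['\n'])

-- ===== PORT B =====
-- the same dead isinstance guard; then one replace
def sse_data_alt (content : String) : String :=
  String.ofList ("data: ".toList ++
    PySem.Chars.replace content.toList ['\n'] ('\n' :: "data: ".toList) ++ ['\n', '\n'])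

-- ===== PRECONDITION & SPEC =====
def Spec_sse_data (content : String) (out : String) : Prop := out = sse_data_alt content
instance (content : String) (out : String) : Decidable (Spec_sse_data content out) := by unfold Spec_sse_data; infer_instance

-- ===== CLAIM (what is proved, stated in full; the proofs are below) =====
def Claim_equal_sse_data : Prop := ∀ (content : String), Dom_sse_data content → Spec_sse_data content (sse_data content)

-- ===== LEMMAS AND PROOFS =====

/-- Structural splitter on a single character: first piece and the remaining pieces. -/
def splitP (c : Char) : List Char → List Char × List (List Char)
  | [] => ([], [])
  | x :: t =>
    let p := splitP c t
    if x = c then ([], p.1 :: p.2) else (x :: p.1, p.2)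

/-- Structural single-character replace. -/
def rep (c : Char) (new : List Char) : List Char → List Char
  | [] => []
  | x :: t => if x = c then new ++ rep c new t else x :: rep c new t

lemma splitOn_go_eq (c : Char) :
    ∀ (l : List Char) (fuel : Nat) (cur : List Char) (acc : List (List Char)),
      l.length ≤ fuel →
      PySem.Chars.splitOn.go [c] fuel l cur acc =
        acc.reverse ++ (cur.reverse ++ (splitP c l).1) :: (splitP c l).2 := by
  intro l
  induction l with
  | nil =>
    intro fuel cur acc _
    cases fuel <;> simp [PySem.Chars.splitOn.go, splitP]
  | cons x t ih =>
    intro fuel cur acc hle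
    cases fuel with
    | zero => simp at hle
    | succ f =>
      by_cases hx : x = c
      · subst hx
        simp only [PySem.Chars.splitOn.go, List.isPrefixOf, BEq.rfl, Bool.true_and,
          if_pos, List.length_cons, List.length_nil, List.drop_succ_cons,
          List.drop_zero]
        rw [ih f [] (cur.reverse :: acc) (by simpa using hle)]
        simp [splitP]
      · have hpre : [c].isPrefixOf (x :: t) = false := by
          simp [List.isPrefixOf]
          exact fun h => absurd h.symm hx
        simp only [PySem.Chars.splitOn.go, hpre, Bool.false_eq_true, if_false]
        rw [ih f (x :: cur) acc (by simpa using hle)]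
        simp [splitP, hx]

lemma replace_go_eq (c : Char) (new : List Char) :
    ∀ (l : List Char) (fuel : Nat) (acc : List Char),
      l.length ≤ fuel →
      PySem.Chars.replace.go [c] new fuel l acc = acc.reverse ++ rep c new l := by
  intro l
  induction l with
  | nil =>
    intro fuel acc _
    cases fuel <;> simp [PySem.Chars.replace.go, rep]
  | cons x t ih =>
    intro fuel acc hle
    cases fuel with
    | zero => simp at hle
    | succ f =>
      by_cases hx : x = c
      · subst hx
        simp only [PySem.Chars.replace.go, List.isPrefixOf, BEq.rfl, Bool.true_and,
          if_pos, List.length_cons, List.length_nil, List.drop_succ_cons,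
          List.drop_zero]
        rw [ih f (new.reverse ++ acc) (by simpa using hle)]
        simp [rep]
      · have hpre : [c].isPrefixOf (x :: t) = false := by
          simp [List.isPrefixOf]
          exact fun h => absurd h.symm hx
        simp only [PySem.Chars.replace.go, hpre, Bool.false_eq_true, if_false]
        rw [ih f (x :: acc) (by simpa using hle)]
        simp [rep, hx]

lemma splitOn_eq (c : Char) (l : List Char) :
    PySem.Chars.splitOn l [c] = (splitP c l).1 :: (splitP c l).2 := by
  unfold PySem.Chars.splitOn
  rw [splitOn_go_eq c l (l.length + 1) [] [] (by omega)]
  simp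

lemma replace_eq (c : Char) (new : List Char) (l : List Char) :
    PySem.Chars.replace l [c] new = rep c new l := by
  unfold PySem.Chars.replace
  simp only [List.isEmpty_cons, Bool.false_eq_true, if_false]
  exact replace_go_eq c new l l.length [] le_rfl

/-- rep written through splitP. -/
lemma rep_eq_splitP (c : Char) (new : List Char) (l : List Char) :
    rep c new l = (splitP c l).1 ++ ((splitP c l).2.map (new ++ ·)).flatten := by
  induction l with
  | nil => simp [rep, splitP]
  | cons x t ih =>
    by_cases hx : x = c <;> simp [rep, splitP, hx, ih]

/-- splitP reconstructs its input. -/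
lemma splitP_reconstruct (c : Char) (l : List Char) :
    (splitP c l).1 ++ ((splitP c l).2.map (c :: ·)).flatten = l := by
  induction l with
  | nil => simp [splitP]
  | cons x t ih =>
    by_cases hx : x = c <;> simp [splitP, hx, ih]

lemma multi_line (pre : List Char) (p1 : List Char) (ps : List (List Char)) :
    ((p1 :: ps).map (fun l => pre ++ l ++ ['\n'])).flatten ++ ['\n'] =
      pre ++ (p1 ++ (ps.map (fun x => ('\n' :: pre) ++ x)).flatten) ++ ['\n', '\n'] := by
  induction ps generalizing p1 with
  | nil => simp
  | cons q qs ih =>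
    have h := ih q
    simp only [List.map_cons, List.flatten_cons, List.append_assoc] at h ⊢
    simp only [List.cons_append]
    have h2 := List.append_cancel_left (List.append_cancel_left h)
    simpa using h2

-- ===== VERDICT (by name: the statement is the Claim_ definition above) =====
theorem sse_data_spec : Claim_equal_sse_data := by
  intro content _
  unfold Spec_sse_data sse_data sse_data_alt
  rw [splitOn_eq, replace_eq, rep_eq_splitP]
  rcases hp : splitP '\n' content.toList with ⟨p1, ps⟩
  cases ps with
  | nil =>
    have hrec := splitP_reconstruct '\n' content.toList
    rw [hp] at hrec
    simp at hrec
    simp [hrec]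
  | cons q qs =>
    rw [if_neg (by simp)]
    exact congrArg String.ofList (multi_line "data: ".toList p1 (q :: qs))
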